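-- pv_equiv track=rewrite | github.com/fergusbarratt/xmps | fMPS.py | create_structure
-- ===== SOURCE A (Python) =====
-- def create_structure(L, d, D):
--     """create_structure: generate the structure of a OBC fMPS
--
--     :param L: Length
--     :param d: local state space dimension
--     :param D: bond dimension
--     """
--
--     if D is None:
--         D = d**L
--     left = [(min(d**n, D), min(d**(n+1), D)) for n in range(L//2)]
--
--     def transpose(ltups):
--         l = []
--         for tup in ltups:
--             l.append((tup[1], tup[0]))
--         return l
--     if L % 2 == 0:
--         structure = left + transpose(left[::-1])
--     else:
--         structure = left + [(left[-1][-1], transpose(left[::-1])[0][0])] +\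
--                     transpose(left[::-1])
--     return structure
-- ===== SOURCE B (Python) =====
-- def create_structure(L, d, D):
--     """create_structure: generate the structure of a OBC fMPS
--
--     :param L: Length
--     :param d: local state space dimension
--     :param D: bond dimension
--     """
--     if D is None:
--         D = d**L
--     return [(min(d**min(i, L - i), D), min(d**min(i + 1, L - i - 1), D))
--             for i in range(L)]
-- ===== Notes on version B (the rewrite author's own statement) =====
-- stated objective: simpler
-- what changed: Replaces the build-left-half / reverse-and-transpose / odd-center-special-case construction with one direct comprehension over all sites using the distance-to-edge formula min(d**min(i, L-i), D) per bond.
import Mathlib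
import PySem

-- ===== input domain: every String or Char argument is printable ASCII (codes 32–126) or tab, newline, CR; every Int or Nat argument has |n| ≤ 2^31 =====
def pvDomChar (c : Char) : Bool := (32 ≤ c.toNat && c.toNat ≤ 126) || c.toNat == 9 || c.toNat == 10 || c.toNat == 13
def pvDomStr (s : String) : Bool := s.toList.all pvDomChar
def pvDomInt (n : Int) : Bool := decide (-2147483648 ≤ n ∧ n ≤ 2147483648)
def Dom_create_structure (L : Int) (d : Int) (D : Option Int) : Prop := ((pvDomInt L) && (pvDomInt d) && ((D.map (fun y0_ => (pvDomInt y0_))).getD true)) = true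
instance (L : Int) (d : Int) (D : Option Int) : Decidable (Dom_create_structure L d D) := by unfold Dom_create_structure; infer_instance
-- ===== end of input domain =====

-- B replaces A's build-left-half / reverse-transpose / odd-center-special-case construction by one
-- direct comprehension over all sites (simpler); equivalence is about the return value only.

-- ===== PORT A =====
-- helper: A's inner 'transpose' (foldl appending the swapped pair, as in the Python)
def pvTranspose (ltups : List (Int × Int)) : List (Int × Int) :=
  ltups.foldl (fun l tup => l ++ [(tup.2, tup.1)]) []

def create_structure (L : Int) (d : Int) (D : Option Int) : List (Int × Int) :=
  -- Python 'if D is None: D = d**L'.  For L < 0 Python's d**L is a float, but that value is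
  -- never used (all loops are empty then); the Int power d^L.toNat stands in for it. Exponents
  -- n in range(L//2) are nonnegative, so d**n is exactly d ^ n.toNat.
  let Dv : Int := match D with | some x => x | none => d ^ L.toNat
  let left : List (Int × Int) :=
    (PySem.List.pyRange 0 (PySem.Int.floordiv L 2) 1).map
      (fun n => (min (d ^ n.toNat) Dv, min (d ^ (n + 1).toNat) Dv))
  -- left[::-1]
  let revLeft : List (Int × Int) := (PySem.List.slice? left none none (-1)).getD []
  if PySem.Int.mod L 2 = 0 then
    left ++ pvTranspose revLeft
  else
    -- left[-1][-1] and transpose(left[::-1])[0][0]; the IndexError case (empty left) is outside Pre_,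
    -- .getD (0,0) is the (unreachable there) total-function default
    left ++ [(((PySem.List.pyGet? left (-1)).getD (0, 0)).2,
              ((PySem.List.pyGet? (pvTranspose revLeft) 0).getD (0, 0)).1)] ++
      pvTranspose revLeft

-- ===== PORT B =====
def create_structure_alt (L : Int) (d : Int) (D : Option Int) : List (Int × Int) :=
  let Dv : Int := match D with | some x => x | none => d ^ L.toNat
  (PySem.List.pyRange 0 L 1).map
    (fun i => (min (d ^ (min i (L - i)).toNat) Dv, min (d ^ (min (i + 1) (L - i - 1)).toNat) Dv))

-- ===== PRECONDITION & SPEC =====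
-- Pre_ excludes exactly the inputs on which A raises: odd L < 2 (left[-1] on the empty
-- left half raises IndexError) and L < 0 with d = 0 and D = None (0**L raises ZeroDivisionError).
def Pre_create_structure (L : Int) (d : Int) (D : Option Int) : Prop :=
  (L % 2 = 0 ∨ 2 ≤ L) ∧ ¬(L < 0 ∧ d = 0 ∧ D = none)
instance (L : Int) (d : Int) (D : Option Int) : Decidable (Pre_create_structure L d D) := by
  unfold Pre_create_structure; infer_instance

def pvWitness_create_structure : Int × Int × Option Int := (5, 2, some 4)

def Spec_create_structure (L : Int) (d : Int) (D : Option Int) (out : List (Int × Int)) : Prop := out = create_structure_alt L d D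
instance (L : Int) (d : Int) (D : Option Int) (out : List (Int × Int)) : Decidable (Spec_create_structure L d D out) := by unfold Spec_create_structure; infer_instance

-- ===== CLAIM (what is proved, stated in full; the proofs are below) =====
def Claim_equal_create_structure : Prop := ∀ (L : Int) (d : Int) (D : Option Int), Dom_create_structure L d D → Pre_create_structure L d D → Spec_create_structure L d D (create_structure L d D)
-- ===== LEMMAS AND PROOFS =====

lemma pvTranspose_eq_map (xs : List (Int × Int)) :
    pvTranspose xs = xs.map (fun t => (t.2, t.1)) := by
  suffices h : ∀ acc : List (Int × Int),
      xs.foldl (fun l tup => l ++ [(tup.2, tup.1)]) acc = acc ++ xs.map (fun t => (t.2, t.1)) by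
    simpa [pvTranspose] using h []
  induction xs with
  | nil => intro acc; simp
  | cons x xs ih => intro acc; simp [ih]

lemma pvLast (f : Nat → Int × Int) (n : Nat) (hn : 0 < n) :
    PySem.List.pyGet? ((List.range n).map f) (-1) = some (f (n - 1)) := by
  obtain ⟨m, rfl⟩ : ∃ m, n = m + 1 := ⟨n - 1, by omega⟩
  simp [List.range_succ, PySem.List.pyGet?_neg_one_append_singleton]

lemma pvFirst (f : Nat → Int × Int) (g : Int × Int → Int × Int) (n : Nat) (hn : 0 < n) :
    PySem.List.pyGet? (List.map g ((List.range n).map f).reverse) 0 = some (g (f (n - 1))) := by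
  obtain ⟨m, rfl⟩ : ∃ m, n = m + 1 := ⟨n - 1, by omega⟩
  simp [List.range_succ]

-- ===== VERDICT (by name: the statement is the Claim_ definition above) =====
theorem create_structure_spec : Claim_equal_create_structure := by
  intro L d D _ hpre
  unfold Spec_create_structure
  rcases hpre with ⟨hpar, -⟩
  simp only [create_structure, create_structure_alt, PySem.List.slice?_none_none_neg_one,
    Option.getD_some, pvTranspose_eq_map,
    PySem.Int.mod_eq_emod_of_pos (by norm_num : (0:Int) < 2),
    PySem.Int.floordiv_eq_ediv_of_pos (by norm_num : (0:Int) < 2)]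
  by_cases hL : L ≤ 0
  · have he : L % 2 = 0 := by rcases hpar with h | h; exacts [h, by omega]
    rw [if_pos he, PySem.List.pyRange_one_eq_nil (by omega : L / 2 ≤ 0),
      PySem.List.pyRange_one_eq_nil (by omega : L ≤ 0)]
    simp
  · have hL2 : 2 ≤ L := by rcases hpar with h | h; exacts [by omega, h]
    simp only [PySem.List.pyRange_one, sub_zero, zero_add, List.map_map]
    by_cases he : L % 2 = 0
    · rw [if_pos he]
      apply List.ext_getElem
      · simp only [List.length_append, List.length_map, List.length_reverse,
          List.length_range]
        omega
      · intro i h1 h2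
        simp only [List.length_append, List.length_map, List.length_reverse,
          List.length_range] at h1 h2
        simp only [List.getElem_append, List.getElem_map, List.getElem_range,
          List.getElem_reverse, List.length_map, List.length_range, Function.comp_apply]
        split_ifs with hi
        · rw [show min ((i:Int)) (L - i) = (i:Int) from by omega,
            show min ((i:Int) + 1) (L - i - 1) = (i:Int) + 1 from by omega]
        · rw [show min ((i:Int)) (L - i) = L - i from by omega,
            show min ((i:Int) + 1) (L - i - 1) = L - i - 1 from by omega]
          simp only [Prod.mk.injEq]
          constructor <;> · congr 1; congr 1; omega
    · rw [if_neg he]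
      rw [pvLast _ _ (show 0 < (L / 2).toNat by omega),
        pvFirst _ _ _ (show 0 < (L / 2).toNat by omega)]
      simp only [Option.getD_some, Function.comp_apply]
      apply List.ext_getElem
      · simp only [List.length_append, List.length_map, List.length_reverse,
          List.length_range, List.length_cons, List.length_nil]
        omega
      · intro i h1 h2
        simp only [List.length_append, List.length_map, List.length_reverse,
          List.length_range, List.length_cons, List.length_nil] at h1 h2
        simp only [List.getElem_append, List.getElem_map, List.getElem_range,
          List.getElem_reverse, List.length_map, List.length_range, List.length_append,
          List.length_cons, List.length_nil, List.getElem_singleton, Function.comp_apply]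
        split_ifs with hi hj
        · rw [show min ((i:Int)) (L - i) = (i:Int) from by omega,
            show min ((i:Int) + 1) (L - i - 1) = (i:Int) + 1 from by omega]
        · -- middle element: i = (L/2).toNat
          rw [show min ((i:Int)) (L - i) = (i:Int) from by omega,
            show min ((i:Int) + 1) (L - i - 1) = L - i - 1 from by omega]
          simp only [Prod.mk.injEq]
          constructor <;> · congr 1; congr 1; omega
        · rw [show min ((i:Int)) (L - i) = L - i from by omega,
            show min ((i:Int) + 1) (L - i - 1) = L - i - 1 from by omega]
          simp only [Prod.mk.injEq]
          constructor <;> · congr 1; congr 1; omega
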